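-- pv_equiv track=rewrite | github.com/SamahGC/Stringology-Based-Motif-Discovery-for-EEG-Analysis | ctm_motif_discovery.py | remove_substring_motifs
-- ===== SOURCE A (Python) =====
-- def remove_substring_motifs(motifs_dict):
--     """Remove motifs fully contained in another motif (keep maximal motifs)."""
--     motifs_sorted = sorted(motifs_dict.keys(), key=lambda x: len(x), reverse=True)
--     maximal_motifs = {}
--     for m in motifs_sorted:
--         is_substring = False
--         for kept in maximal_motifs:
--             if m in kept:
--                 is_substring = True
--                 break
--         if not is_substring:
--             maximal_motifs[m] = motifs_dict[m]
--     return maximal_motifs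
-- ===== SOURCE B (Python) =====
-- def remove_substring_motifs(motifs_dict):
--     """Remove motifs fully contained in another motif (keep maximal motifs)."""
--     keys = list(motifs_dict.keys())
--
--     def is_maximal(m):
--         return all(m == k or m not in k for k in keys)
--
--     order = sorted(keys, key=len, reverse=True)
--     return {m: motifs_dict[m] for m in order if is_maximal(m)}
-- ===== Notes on version B (the rewrite author's own statement) =====
-- stated objective: alternative
-- what changed: B replaces A's incrementally-built kept-set with its inner break-out scan by a stateless global maximality test (a motif is kept iff it is a substring of no other key), applied as a single filter over the length-sorted keys.
import Mathlib
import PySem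

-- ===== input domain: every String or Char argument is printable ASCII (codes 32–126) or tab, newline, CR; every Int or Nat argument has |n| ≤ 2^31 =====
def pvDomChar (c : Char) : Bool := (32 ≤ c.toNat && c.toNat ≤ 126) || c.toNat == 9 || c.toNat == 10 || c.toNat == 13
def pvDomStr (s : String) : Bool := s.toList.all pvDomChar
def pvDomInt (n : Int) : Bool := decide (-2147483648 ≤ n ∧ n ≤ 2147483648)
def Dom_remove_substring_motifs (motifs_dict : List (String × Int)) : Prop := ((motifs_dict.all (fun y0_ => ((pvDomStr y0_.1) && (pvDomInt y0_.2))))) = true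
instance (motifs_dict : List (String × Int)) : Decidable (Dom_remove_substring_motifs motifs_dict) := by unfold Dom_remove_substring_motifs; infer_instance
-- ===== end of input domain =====

-- B replaces A's incremental kept-set (with its inner break-out scan) by a stateless global
-- pairwise maximality test applied as one filter over the length-sorted keys; objective:
-- alternative (same worst-case cost, structurally different).

-- ===== PORT A =====
-- Literal port of A: sort keys by length descending, then the loop keeps a dict
-- 'maximal_motifs' and skips m when m is a substring of some already-kept key
-- ('for kept in …: if m in kept: break' = any over the kept keys).
-- motifs_dict[m] is ported as getD with default 0: m is always a key, so Python's
-- lookup cannot raise and the default is never used.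
def remove_substring_motifs (motifs_dict : List (String × Int)) : List (String × Int) :=
  let d := PySem.Dict.ofList motifs_dict
  let motifs_sorted := PySem.List.sorted d.keys (fun x => PySem.Str.len x) true
  (motifs_sorted.foldl
    (fun acc m =>
      if acc.keys.any (fun kept => PySem.Str.isIn m kept) then acc
      else acc.insert m (d.getD m 0))
    PySem.Dict.empty).items

-- ===== PORT B =====
-- B's helper is_maximal(m): m is a substring of no OTHER key of the dict.
def pvIsMaximal (ks : List String) (m : String) : Bool :=
  ks.all (fun k => m == k || !(PySem.Str.isIn m k))

-- Literal port of B: filter the length-sorted keys by the global test, then the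
-- dict comprehension (a fold of inserts over the surviving keys).
def remove_substring_motifs_alt (motifs_dict : List (String × Int)) : List (String × Int) :=
  let d := PySem.Dict.ofList motifs_dict
  let ks := d.keys
  let order := PySem.List.sorted ks (fun x => PySem.Str.len x) true
  ((order.filter (fun m => pvIsMaximal ks m)).foldl
    (fun acc m => acc.insert m (d.getD m 0)) PySem.Dict.empty).items

-- ===== PRECONDITION & SPEC =====
def Spec_remove_substring_motifs (motifs_dict : List (String × Int)) (out : List (String × Int)) : Prop := out = remove_substring_motifs_alt motifs_dict
instance (motifs_dict : List (String × Int)) (out : List (String × Int)) : Decidable (Spec_remove_substring_motifs motifs_dict out) := by unfold Spec_remove_substring_motifs; infer_instance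

-- ===== CLAIM (what is proved, stated in full; the proofs are below) =====
def Claim_equal_remove_substring_motifs : Prop := ∀ (motifs_dict : List (String × Int)), Dom_remove_substring_motifs motifs_dict → Spec_remove_substring_motifs motifs_dict (remove_substring_motifs motifs_dict)

-- ===== LEMMAS AND PROOFS =====

-- A string that is an infix of a different string is strictly shorter.
theorem pv_infix_lt_of_ne (m k : String) (hne : m ≠ k) (hinf : m.toList <:+: k.toList) :
    m.toList.length < k.toList.length := by
  rcases lt_or_eq_of_le (List.IsInfix.length_le hinf) with h | h
  · exact h
  · exact absurd (String.toList_inj.mp (List.IsInfix.eq_of_length hinf h)) hne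

-- Python's 'sub in s' as list-infix, on String.
theorem pv_isIn_infix (a b : String) : PySem.Str.isIn a b = true ↔ a.toList <:+: b.toList := by
  simp [PySem.Chars.isIn_iff_infix]

-- Loop invariant for A's fold: with every already-processed key covered (infix-wise)
-- by some key of acc, the fold appends exactly the pvIsMaximal-filtered rest.
theorem pv_loop_inv (d : PySem.Dict String Int) (ks : List String) :
    ∀ (rest done : List String) (acc : PySem.Dict String Int),
    (done ++ rest).Perm ks →
    (done ++ rest).Nodup →
    (done ++ rest).Pairwise (fun a b => PySem.Str.len b ≤ PySem.Str.len a) →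
    (∀ k ∈ acc.keys, k ∈ done) →
    (∀ k ∈ done, ∃ k' ∈ acc.keys, k.toList <:+: k'.toList) →
    (rest.foldl
      (fun acc m =>
        if acc.keys.any (fun kept => PySem.Str.isIn m kept) then acc
        else acc.insert m (d.getD m 0))
      acc).items
      = acc.items ++ ((rest.filter (fun m => pvIsMaximal ks m)).map (fun m => (m, d.getD m 0))) := by
  intro rest
  induction rest with
  | nil => intro done acc _ _ _ _ _; simp
  | cons m rest' ih =>
    intro done acc hperm hnd hsort hsub hcov
    have hmd : m ∉ done := by
      have h := List.nodup_append.mp hnd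
      exact fun hm => (h.2.2 m hm m (by simp)) rfl
    have hmem_split : ∀ k, k ∈ ks → k ∈ done ∨ k = m ∨ k ∈ rest' := by
      intro k hk
      have : k ∈ done ++ (m :: rest') := hperm.symm.mem_iff.mp hk
      simpa using this
    have hperm' : ((done ++ [m]) ++ rest').Perm ks := by
      simpa [List.append_assoc] using hperm
    have hnd' : ((done ++ [m]) ++ rest').Nodup := by
      simpa [List.append_assoc] using hnd
    have hsort' : ((done ++ [m]) ++ rest').Pairwise (fun a b => PySem.Str.len b ≤ PySem.Str.len a) := by
      simpa [List.append_assoc] using hsort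
    by_cases hc : acc.keys.any (fun kept => PySem.Str.isIn m kept) = true
    · -- m is a substring of an already-kept key: skipped, and not pvIsMaximal
      obtain ⟨k', hk'mem, hk'in⟩ := List.any_eq_true.mp hc
      have hinf : m.toList <:+: k'.toList := (pv_isIn_infix _ _).mp (by simpa using hk'in)
      have hk'done : k' ∈ done := hsub k' hk'mem
      have hk'ks : k' ∈ ks := hperm.mem_iff.mp (by simp [hk'done])
      have hne : m ≠ k' := fun h => hmd (h ▸ hk'done)
      have hmax : pvIsMaximal ks m = false := by
        simp only [pvIsMaximal, List.all_eq_false]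
        refine ⟨k', hk'ks, ?_⟩
        simp only [Bool.or_eq_true, beq_iff_eq, Bool.not_eq_eq_eq_not, Bool.not_true, not_or,
          Bool.not_eq_false, PySem.Str.isIn_eq, PySem.Chars.isIn_iff_infix]
        exact ⟨hne, hinf⟩
      have step := ih (done ++ [m]) acc hperm' hnd' hsort'
        (fun k hk => by simp [hsub k hk])
        (by
          intro k hk
          rcases (by simpa using hk : k ∈ done ∨ k = m) with h | rfl
          · exact hcov k h
          · exact ⟨k', hk'mem, hinf⟩)
      simp only [List.foldl_cons]
      rw [if_pos hc, step, List.filter_cons_of_neg (by simp [hmax])]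
    · -- m is kept, and it is pvIsMaximal
      have hnotmem : m ∉ acc.keys := fun h => hmd (hsub m h)
      have hcont : acc.contains m = false := by
        rw [PySem.Dict.contains_eq_decide_mem_keys]
        simp [hnotmem]
      have hmax : pvIsMaximal ks m = true := by
        simp only [pvIsMaximal, List.all_eq_true]
        intro k hk
        by_cases hne : m = k
        · simp [hne]
        have hin : PySem.Str.isIn m k = false := by
          rcases Bool.eq_false_or_eq_true (PySem.Str.isIn m k) with h | h
          swap
          · exact h
          exfalso
          have hinf : m.toList <:+: k.toList := (pv_isIn_infix _ _).mp h
          have hlt : m.toList.length < k.toList.length := pv_infix_lt_of_ne m k hne hinf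
          rcases hmem_split k hk with hkd | rfl | hkr
          · obtain ⟨k', hk'mem, hk'inf⟩ := hcov k hkd
            exact hc (List.any_eq_true.mpr ⟨k', hk'mem,
              by simpa using (pv_isIn_infix _ _).mpr (hinf.trans hk'inf)⟩)
          · exact hne rfl
          · have hple : PySem.Str.len k ≤ PySem.Str.len m := by
              have h1 := (List.pairwise_append.mp hsort).2.1
              exact (List.pairwise_cons.mp h1).1 k hkr
            simp only [PySem.Str.len_eq] at hple
            have e1 : m.toList.length = m.length := by simp
            have e2 : k.toList.length = k.length := by simp
            omega
        simp only [Bool.or_eq_true, beq_iff_eq]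
        exact Or.inr (by simpa using hin)
      have hitems : (acc.insert m (d.getD m 0)).items = acc.items ++ [(m, d.getD m 0)] :=
        PySem.Dict.items_insert_of_not_contains acc (d.getD m 0) hcont
      have step := ih (done ++ [m]) (acc.insert m (d.getD m 0)) hperm' hnd' hsort'
        (by
          intro k hk
          rcases (PySem.Dict.mem_keys_insert _ _ _ _).mp hk with rfl | hk
          · simp
          · simp [hsub k hk])
        (by
          intro k hk
          rcases (by simpa using hk : k ∈ done ∨ k = m) with h | rfl
          · obtain ⟨k', hk'mem, hk'inf⟩ := hcov k h
            exact ⟨k', (PySem.Dict.mem_keys_insert _ _ _ _).mpr (Or.inr hk'mem), hk'inf⟩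
          · exact ⟨k, (PySem.Dict.mem_keys_insert _ _ _ _).mpr (Or.inl rfl), List.infix_refl _⟩)
      simp only [List.foldl_cons]
      rw [if_neg hc, step, hitems, List.filter_cons_of_pos (by simp [hmax])]
      simp

-- ===== VERDICT (by name: the statement is the Claim_ definition above) =====
theorem remove_substring_motifs_spec : Claim_equal_remove_substring_motifs := by
  intro md _
  show _ = _
  unfold remove_substring_motifs remove_substring_motifs_alt
  have hknd : (PySem.Dict.ofList md).keys.Nodup := PySem.Dict.nodup_keys_ofList md
  have hperm : (PySem.List.sorted (PySem.Dict.ofList md).keys (fun x => PySem.Str.len x) true).Perm (PySem.Dict.ofList md).keys :=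
    PySem.List.sorted_perm _ _ _
  have hnd : (PySem.List.sorted (PySem.Dict.ofList md).keys (fun x => PySem.Str.len x) true).Nodup :=
    hperm.nodup_iff.mpr hknd
  have hA := pv_loop_inv (PySem.Dict.ofList md) (PySem.Dict.ofList md).keys
    (PySem.List.sorted (PySem.Dict.ofList md).keys (fun x => PySem.Str.len x) true) [] PySem.Dict.empty
    (by simpa using hperm) (by simpa using hnd)
    (by simpa using PySem.List.sorted_pairwise_rev (PySem.Dict.ofList md).keys (fun x => PySem.Str.len x))
    (by simp) (by simp)
  have hB := PySem.Dict.items_foldl_insert_fresh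
    (l := (PySem.List.sorted (PySem.Dict.ofList md).keys (fun x => PySem.Str.len x) true).filter
      (fun m => pvIsMaximal (PySem.Dict.ofList md).keys m))
    (k := fun a => a) (v := fun a => (PySem.Dict.ofList md).getD a 0) (d := PySem.Dict.empty)
    (by intro a _; simp) (by simpa using hnd.filter _)
  simp only [hA, hB]
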